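-- pv_equiv track=rewrite | github.com/alexander-sil/simple-api-main | app.py | transliterate_en_ru
-- ===== SOURCE A (Python) =====
-- def transliterate_en_ru(text):
--     translit_en_to_ru_map = {
--         'a': 'а', 'b': 'б', 'v': 'в', 'g': 'г', 'd': 'д',
--         'e': 'е', 'yo': 'ё', 'zh': 'ж', 'z': 'з', 'i': 'и',
--         'y': 'й', 'k': 'к', 'l': 'л', 'm': 'м', 'n': 'н',
--         'o': 'о', 'p': 'п', 'r': 'р', 's': 'с', 't': 'т',
--         'u': 'у', 'f': 'ф', 'kh': 'х', 'ts': 'ц', 'ch': 'ч',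
--         'sh': 'ш', 'shch': 'щ', 'y': 'ы', 'e': 'э', 'yu': 'ю', 'ya': 'я'
--     }
--     for key in sorted(translit_en_to_ru_map.keys(), key=len, reverse=True):
--         text = text.replace(key, translit_en_to_ru_map[key])
--     return text
-- ===== SOURCE B (Python) =====
-- TWO = {'yo': 'ё', 'zh': 'ж', 'kh': 'х', 'ts': 'ц',
--        'ch': 'ч', 'sh': 'ш', 'yu': 'ю', 'ya': 'я'}
-- ONE = {'a': 'а', 'b': 'б', 'v': 'в', 'g': 'г', 'd': 'д', 'e': 'э', 'z': 'з',
--        'i': 'и', 'y': 'ы', 'k': 'к', 'l': 'л', 'm': 'м', 'n': 'н', 'o': 'о',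
--        'p': 'п', 'r': 'р', 's': 'с', 't': 'т', 'u': 'у', 'f': 'ф'}
--
--
-- def _piece(p):
--     # one forward pass: longest match first (digraph, then single letter)
--     out = []
--     i = 0
--     while i < len(p):
--         pair = p[i:i + 2]
--         if pair in TWO:
--             out.append(TWO[pair])
--             i += 2
--         else:
--             out.append(ONE.get(p[i], p[i]))
--             i += 1
--     return ''.join(out)
--
--
-- def transliterate_en_ru(text):
--     # 'shch' has absolute priority in A (longest key replaced first),
--     # so split on it, then transliterate each piece in a single scan.
--     return 'щ'.join(_piece(p) for p in text.split('shch'))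
-- ===== Notes on version B (the rewrite author's own statement) =====
-- stated objective: alternative
-- what changed: Instead of ~29 full-string replace passes (one per key, longest first), B splits the text on 'shch' once and transliterates each piece in a single left-to-right scan that tries the digraph at the cursor first, then the single letter, via two small dicts (duplicate keys 'y'/'e' already collapsed to their last values).
import Mathlib
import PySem

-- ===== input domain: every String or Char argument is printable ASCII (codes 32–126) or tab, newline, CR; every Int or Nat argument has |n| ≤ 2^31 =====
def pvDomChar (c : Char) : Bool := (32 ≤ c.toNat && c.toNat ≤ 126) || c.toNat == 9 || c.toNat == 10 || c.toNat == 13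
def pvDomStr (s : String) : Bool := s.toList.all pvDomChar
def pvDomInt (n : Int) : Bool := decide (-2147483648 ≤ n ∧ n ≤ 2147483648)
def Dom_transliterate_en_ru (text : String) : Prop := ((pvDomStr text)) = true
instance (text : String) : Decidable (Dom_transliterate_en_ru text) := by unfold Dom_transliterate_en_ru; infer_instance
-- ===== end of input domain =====

-- B replaces A's 29 longest-first full-string replace passes by one split on "shch"
-- plus a single left-to-right longest-match scan per piece (alternative algorithm, same values).

-- ===== PORT A =====
def transliterate_en_ru (text : String) : String :=
  let m : PySem.Dict String String :=
    PySem.Dict.empty |>.insert "a" "а" |>.insert "b" "б" |>.insert "v" "в" |>.insert "g" "г" |>.insert "d" "д" |>.insert "e" "е" |>.insert "yo" "ё" |>.insert "zh" "ж" |>.insert "z" "з" |>.insert "i" "и" |>.insert "y" "й" |>.insert "k" "к" |>.insert "l" "л" |>.insert "m" "м" |>.insert "n" "н" |>.insert "o" "о" |>.insert "p" "п" |>.insert "r" "р" |>.insert "s" "с" |>.insert "t" "т" |>.insert "u" "у" |>.insert "f" "ф" |>.insert "kh" "х" |>.insert "ts" "ц" |>.insert "ch" "ч" |>.insert "sh"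 "ш" |>.insert "shch" "щ" |>.insert "y" "ы" |>.insert "e" "э" |>.insert "yu" "ю" |>.insert "ya" "я"
  (PySem.List.sorted m.keys (fun k => PySem.Str.len k) true).foldl
    (fun t key => PySem.Str.replace t key (m.getD key "")) text

-- ===== PORT B =====
def pvTwo : PySem.Dict (List Char) (List Char) :=
  PySem.Dict.mk [(['y','o'], ['ё']), (['z','h'], ['ж']), (['k','h'], ['х']), (['t','s'], ['ц']), (['c','h'], ['ч']), (['s','h'], ['ш']), (['y','u'], ['ю']), (['y','a'], ['я'])]

def pvOne : PySem.Dict (List Char) (List Char) :=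
  PySem.Dict.mk [(['a'], ['а']), (['b'], ['б']), (['v'], ['в']), (['g'], ['г']), (['d'], ['д']), (['e'], ['э']), (['z'], ['з']), (['i'], ['и']), (['y'], ['ы']), (['k'], ['к']), (['l'], ['л']), (['m'], ['м']), (['n'], ['н']), (['o'], ['о']), (['p'], ['п']), (['r'], ['р']), (['s'], ['с']), (['t'], ['т']), (['u'], ['у']), (['f'], ['ф'])]

-- the while-loop of Source B's _piece, as recursion on the unread suffix (out.append -> ++, ''.join -> concatenation)
def pvPiece : List Char → List Char
  | [] => []
  | a :: t =>
    match pvTwo.get? ((a :: t).take 2) with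
    | some v => v ++ pvPiece (t.drop 1)
    | none => pvOne.getD [a] [a] ++ pvPiece t
termination_by l => l.length
decreasing_by all_goals (simp only [List.length_cons, List.length_drop]; omega)

def transliterate_en_ru_alt (text : String) : String :=
  String.ofList (PySem.Chars.join ['щ']
    ((PySem.Chars.splitOn text.toList ['s','h','c','h']).map pvPiece))

-- ===== PRECONDITION & SPEC =====
def Spec_transliterate_en_ru (text : String) (out : String) : Prop := out = transliterate_en_ru_alt text
instance (text : String) (out : String) : Decidable (Spec_transliterate_en_ru text out) := by unfold Spec_transliterate_en_ru; infer_instance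

-- ===== CLAIM (what is proved, stated in full; the proofs are below) =====
def Claim_equal_transliterate_en_ru : Prop := ∀ (text : String), Dom_transliterate_en_ru text → Spec_transliterate_en_ru text (transliterate_en_ru text)

-- ===== LEMMAS AND PROOFS =====

-- leftmost-first replacement, as a plain recursion (= PySem.Chars.replace for a nonempty pattern)
def pvRep (o n : List Char) (s : List Char) : List Char :=
  match s with
  | [] => []
  | c :: t => if o ≠ [] ∧ o.isPrefixOf (c :: t) then n ++ pvRep o n ((c :: t).drop o.length)
              else c :: pvRep o n t
termination_by s.length
decreasing_by
  · rename_i h; simp only [List.length_cons, List.length_drop]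
    cases o with | nil => exact absurd rfl h.1 | cons o1 ot => simp; try omega
  · simp

-- str.split, as a plain recursion (= PySem.Chars.splitOn for a nonempty separator)
def pvSpl (sep : List Char) (s : List Char) : List (List Char) :=
  match s with
  | [] => [[]]
  | c :: t => if sep ≠ [] ∧ sep.isPrefixOf (c :: t) then [] :: pvSpl sep ((c :: t).drop sep.length)
              else (pvSpl sep t).modifyHead (c :: ·)
termination_by s.length
decreasing_by
  · rename_i h; cases sep with | nil => exact absurd rfl h.1 | cons o1 ot => simp; try omega
  · simp

theorem pvModifyHead_id (l : List (List Char)) : List.modifyHead (fun x => x) l = l := by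
  cases l <;> rfl

theorem replaceGo_eq (o n : List Char) (ho : o ≠ []) :
    ∀ fuel s acc, s.length ≤ fuel →
      PySem.Chars.replace.go o n fuel s acc = acc.reverse ++ pvRep o n s := by
  intro fuel
  induction fuel with
  | zero => intro s acc h
            have : s = [] := List.length_eq_zero_iff.mp (Nat.le_zero.mp h)
            subst this; simp [PySem.Chars.replace.go, pvRep]
  | succ f ih =>
    intro s acc h
    match s with
    | [] => simp [PySem.Chars.replace.go, pvRep]
    | c :: t =>
      rw [PySem.Chars.replace.go]
      by_cases hp : o.isPrefixOf (c :: t)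
      · rw [if_pos hp, ih _ _ (by
          have : 1 ≤ o.length := by cases o with | nil => exact absurd rfl ho | cons a b => simp
          simp at h ⊢; omega)]
        rw [pvRep, if_pos ⟨ho, hp⟩]; simp
      · rw [if_neg hp, ih _ _ (by simp at h ⊢; omega)]
        rw [pvRep, if_neg (by simp [hp])]; simp

theorem replace_eq (s o n : List Char) (ho : o ≠ []) :
    PySem.Chars.replace s o n = pvRep o n s := by
  rw [PySem.Chars.replace, if_neg (by simp [ho]), replaceGo_eq o n ho _ _ _ le_rfl]
  simp

theorem splitGo_eq (sep : List Char) (hs : sep ≠ []) :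
    ∀ fuel s cur acc, s.length < fuel →
      PySem.Chars.splitOn.go sep fuel s cur acc
        = acc.reverse ++ (pvSpl sep s).modifyHead (cur.reverse ++ ·) := by
  intro fuel
  induction fuel with
  | zero => intro s cur acc h; omega
  | succ f ih =>
    intro s cur acc h
    match s with
    | [] => rw [PySem.Chars.splitOn.go]; simp [pvSpl]; omega
    | c :: t =>
      rw [PySem.Chars.splitOn.go]
      by_cases hp : sep.isPrefixOf (c :: t)
      · rw [if_pos hp, ih _ _ _ (by
          have : 1 ≤ sep.length := by cases sep with | nil => exact absurd rfl hs | cons a b => simp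
          simp at h ⊢; omega)]
        rw [pvSpl, if_pos ⟨hs, hp⟩]; simp [pvModifyHead_id]
      · rw [if_neg hp, ih _ _ _ (by simp at h ⊢; omega)]
        rw [pvSpl, if_neg (by simp [hp])]
        cases hq : pvSpl sep t with
        | nil => simp
        | cons q qs => simp

theorem splitOn_eq (s sep : List Char) (hs : sep ≠ []) :
    PySem.Chars.splitOn s sep = pvSpl sep s := by
  rw [PySem.Chars.splitOn, splitGo_eq sep hs _ _ _ _ (by omega)]
  simp [pvModifyHead_id]

-- concrete data of the proof
def pvSH : List Char := ['s','h','c','h']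
def pvPairs2 : List (List Char × Char) := [(['y','o'], 'ё'), (['z','h'], 'ж'), (['k','h'], 'х'), (['t','s'], 'ц'), (['c','h'], 'ч'), (['s','h'], 'ш'), (['y','u'], 'ю'), (['y','a'], 'я')]
def pvSingles : List (Char × Char) := [('a', 'а'), ('b', 'б'), ('v', 'в'), ('g', 'г'), ('d', 'д'), ('e', 'э'), ('z', 'з'), ('i', 'и'), ('y', 'ы'), ('k', 'к'), ('l', 'л'), ('m', 'м'), ('n', 'н'), ('o', 'о'), ('p', 'п'), ('r', 'р'), ('s', 'с'), ('t', 'т'), ('u', 'у'), ('f', 'ф')]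
def pvAll : List (List Char × Char) := pvPairs2 ++ pvSingles.map (fun p => ([p.1], p.2))
def pvVals : List Char := ['ё','ж','х','ц','ч','ш','ю','я']

def pvFold (ps : List (List Char × Char)) (s : List Char) : List Char :=
  ps.foldl (fun s p => pvRep p.1 [p.2] s) s

def pvSigma (c : Char) : Char :=
  pvSingles.foldl (fun x p => if p.1 = x then p.2 else x) c

-- B's scan restricted to the digraph level
def pvG2 : List Char → List Char
  | [] => []
  | a :: t =>
    match pvTwo.get? ((a :: t).take 2) with
    | some v => v ++ pvG2 (t.drop 1)
    | none => a :: pvG2 t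
termination_by l => l.length
decreasing_by all_goals (simp only [List.length_cons, List.length_drop]; omega)

-- basic pvRep facts
theorem rep_nil (o n : List Char) : pvRep o n [] = [] := by rw [pvRep]

theorem rep_skip (o n : List Char) (c : Char) (t : List Char)
    (h : ¬ o.isPrefixOf (c :: t) = true) : pvRep o n (c :: t) = c :: pvRep o n t := by
  rw [pvRep, if_neg (by simp [h])]

theorem rep_match (o n : List Char) (c : Char) (t : List Char) (ho : o ≠ [])
    (h : o.isPrefixOf (c :: t) = true) :
    pvRep o n (c :: t) = n ++ pvRep o n ((c :: t).drop o.length) := by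
  rw [pvRep, if_pos ⟨ho, h⟩]

theorem isPrefixOf_pair (x y a : Char) (t : List Char) :
    [x,y].isPrefixOf (a :: t) = true ↔ x = a ∧ t.head? = some y := by
  cases t with
  | nil => simp [List.isPrefixOf]
  | cons c t' =>
    simp only [List.isPrefixOf, Bool.and_eq_true, beq_iff_eq, List.head?_cons, Option.some.injEq]
    constructor
    · rintro ⟨h1, h2, _⟩; exact ⟨h1, h2.symm⟩
    · rintro ⟨h1, h2⟩; exact ⟨h1, h2.symm, by simp⟩

theorem pvSpl_ne_nil (sep s : List Char) : pvSpl sep s ≠ [] := by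
  induction s using pvSpl.induct sep with
  | case1 => rw [pvSpl]; simp
  | case2 c t h ih => rw [pvSpl, if_pos h]; simp
  | case3 c t h ih =>
    rw [pvSpl, if_neg h]
    cases hq : pvSpl sep t with
    | nil => exact absurd hq ih
    | cons q qs => simp

theorem rep_eq_join (o n : List Char) (_ho : o ≠ []) (s : List Char) :
    pvRep o n s = PySem.Chars.join n (pvSpl o s) := by
  induction s using pvSpl.induct o with
  | case1 => rw [rep_nil, pvSpl, PySem.Chars.join_singleton]
  | case2 c t h ih =>
    rw [pvSpl, if_pos h, pvRep, if_pos h]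
    cases hq : pvSpl o ((c :: t).drop o.length) with
    | nil => exact absurd hq (pvSpl_ne_nil o _)
    | cons p ps =>
      rw [hq] at ih
      rw [PySem.Chars.join_cons_cons, ih, List.nil_append]
  | case3 c t h ih =>
    rw [pvSpl, if_neg h, pvRep, if_neg h]
    cases hq : pvSpl o t with
    | nil => exact absurd hq (pvSpl_ne_nil o _)
    | cons p ps =>
      rw [hq] at ih
      cases ps with
      | nil =>
        rw [PySem.Chars.join_singleton] at ih
        simp only [List.modifyHead_cons, PySem.Chars.join_singleton]
        rw [ih]
      | cons q qs =>
        rw [PySem.Chars.join_cons_cons] at ih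
        simp only [List.modifyHead_cons, PySem.Chars.join_cons_cons]
        rw [ih]
        simp

theorem rep_o_nil (n s : List Char) : pvRep [] n s = s := by
  induction s with
  | nil => rw [rep_nil]
  | cons c t ih => rw [pvRep, if_neg (by simp)]; rw [ih]

theorem rep_not_prefix_sep (o : List Char) (ho : o ≠ []) (h2 : 'щ' ∉ o) (y : List Char) :
    ¬ o.isPrefixOf ('щ' :: y) = true := by
  intro hp
  cases o with
  | nil => exact ho rfl
  | cons o1 ot =>
    simp only [List.isPrefixOf, Bool.and_eq_true, beq_iff_eq] at hp
    exact h2 (by simp [hp.1])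

theorem rep_append_sep (o n : List Char) (h2 : 'щ' ∉ o) (x y : List Char) :
    pvRep o n (x ++ 'щ' :: y) = pvRep o n x ++ 'щ' :: pvRep o n y := by
  by_cases ho : o = []
  · subst ho; rw [rep_o_nil, rep_o_nil, rep_o_nil]
  · have hmain : ∀ fuel x, x.length ≤ fuel → ∀ y,
        pvRep o n (x ++ 'щ' :: y) = pvRep o n x ++ 'щ' :: pvRep o n y := by
      intro fuel
      induction fuel with
      | zero =>
        intro x hx y
        have : x = [] := List.length_eq_zero_iff.mp (Nat.le_zero.mp hx)
        subst this
        rw [List.nil_append, rep_nil, List.nil_append,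
          rep_skip _ _ _ _ (rep_not_prefix_sep o ho h2 y)]
      | succ f ihf =>
        intro x hx y
        match x with
        | [] =>
          rw [List.nil_append, rep_nil, List.nil_append,
            rep_skip _ _ _ _ (rep_not_prefix_sep o ho h2 y)]
        | c :: t =>
          by_cases hp : o.isPrefixOf ((c :: t) ++ 'щ' :: y)
          · have hp' : o <+: (c :: t) ++ 'щ' :: y := List.isPrefixOf_iff_prefix.mp hp
            have hlen : o.length ≤ (c :: t).length := by
              by_contra hgt
              push Not at hgt
              apply h2
              rw [List.prefix_iff_eq_take] at hp'
              rw [hp', show (c :: t ++ 'щ' :: y) = (c :: t) ++ ('щ' :: y) from rfl,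
                List.take_append, List.take_of_length_le (le_of_lt hgt)]
              refine List.mem_append_right _ ?_
              cases hk : o.length - (c :: t).length with
              | zero => omega
              | succ k => simp
            have hpx : o.isPrefixOf (c :: t) = true := by
              rw [List.isPrefixOf_iff_prefix, List.prefix_iff_eq_take]
              rw [List.prefix_iff_eq_take] at hp'
              rw [hp', List.take_append_of_le_length hlen]
              simp [List.length_take]
            have h1le : 1 ≤ o.length := by
              cases o with | nil => exact absurd rfl ho | cons a b => simp
            rw [show (c :: t) ++ 'щ' :: y = c :: (t ++ 'щ' :: y) from rfl,
              rep_match o n _ _ ho (by rw [show c :: (t ++ 'щ' :: y) = (c :: t) ++ 'щ' :: y from rfl]; exact hp),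
              rep_match o n c t ho hpx,
              show (c :: (t ++ 'щ' :: y)).drop o.length = ((c :: t) ++ 'щ' :: y).drop o.length from rfl,
              List.drop_append_of_le_length hlen,
              ihf ((c :: t).drop o.length) (by simp at hx ⊢; omega) y,
              List.append_assoc]
          · have hpx : ¬ o.isPrefixOf (c :: t) = true := by
              intro hc
              exact hp (List.isPrefixOf_iff_prefix.mpr
                ((List.isPrefixOf_iff_prefix.mp hc).trans (List.prefix_append _ _)))
            rw [show (c :: t) ++ 'щ' :: y = c :: (t ++ 'щ' :: y) from rfl,
              rep_skip _ _ _ _ (by rw [show c :: (t ++ 'щ' :: y) = (c :: t) ++ 'щ' :: y from rfl]; exact hp),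
              rep_skip _ _ _ _ hpx,
              ihf t (by simp at hx ⊢; omega) y]
            rfl
    exact hmain x.length x le_rfl y

theorem fold_nil (ps : List (List Char × Char)) : pvFold ps [] = [] := by
  induction ps with
  | nil => rfl
  | cons p ps ih => simp only [pvFold, List.foldl_cons, rep_nil]; exact ih

theorem fold_cons (p : List Char × Char) (ps : List (List Char × Char)) (s : List Char) :
    pvFold (p :: ps) s = pvFold ps (pvRep p.1 [p.2] s) := rfl

theorem fold_append (p1 p2 : List (List Char × Char)) (s : List Char) :
    pvFold (p1 ++ p2) s = pvFold p2 (pvFold p1 s) := by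
  simp [pvFold, List.foldl_append]

theorem fold_append_sep (ps : List (List Char × Char)) (hps : ∀ p ∈ ps, 'щ' ∉ p.1) :
    ∀ x y, pvFold ps (x ++ 'щ' :: y) = pvFold ps x ++ 'щ' :: pvFold ps y := by
  induction ps with
  | nil => intro x y; rfl
  | cons p ps ih =>
    intro x y
    rw [fold_cons, rep_append_sep p.1 [p.2] (hps p (by simp)), ih (fun q hq => hps q (by simp [hq])),
        fold_cons, fold_cons]

theorem fold_join (ps : List (List Char × Char)) (hps : ∀ p ∈ ps, 'щ' ∉ p.1) :
    ∀ parts, parts ≠ [] →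
      pvFold ps (PySem.Chars.join ['щ'] parts) = PySem.Chars.join ['щ'] (parts.map (pvFold ps)) := by
  intro parts
  induction parts with
  | nil => intro h; exact absurd rfl h
  | cons p qs ih =>
    intro _
    cases qs with
    | nil => rw [PySem.Chars.join_singleton, List.map_cons, List.map_nil, PySem.Chars.join_singleton]
    | cons q qs' =>
      rw [PySem.Chars.join_cons_cons,
        show p ++ ['щ'] ++ PySem.Chars.join ['щ'] (q :: qs') = p ++ 'щ' :: PySem.Chars.join ['щ'] (q :: qs') by simp,
        fold_append_sep ps hps p _, ih (by simp), List.map_cons, List.map_cons,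
        List.map_cons, PySem.Chars.join_cons_cons]
      simp

-- ==== digraph passes = greedy digraph scan ====

theorem pairs2_shape : ∀ p ∈ pvPairs2, ∃ x y, p.1 = [x,y] := by
  intro p hp; fin_cases hp <;> exact ⟨_, _, rfl⟩
theorem pairs2_val : ∀ p ∈ pvPairs2, p.2 ∈ pvVals := by
  intro p hp; fin_cases hp <;> decide
theorem pairs2_snd_not_val : ∀ p ∈ pvPairs2, ∀ c ∈ pvVals, some c ≠ p.1.getLast? := by
  intro p hp c hc; fin_cases hp <;> fin_cases hc <;> decide
theorem mem_pairs2_get? : ∀ p ∈ pvPairs2, pvTwo.get? p.1 = some [p.2] := by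
  intro p hp; fin_cases hp <;> rfl

theorem rep_head (o : List Char) (v : Char) (t : List Char) :
    ∀ hc, (pvRep o [v] t).head? = some hc → hc = v ∨ t.head? = some hc := by
  intro hc h
  cases t with
  | nil => rw [rep_nil] at h; simp at h
  | cons c t' =>
    rw [pvRep] at h
    split at h
    · simp at h; exact Or.inl h.symm
    · simp at h; exact Or.inr (by simp [h])

theorem fold_skip2 (a b : Char) :
    ∀ ps, (∀ p ∈ ps, ∃ x y, p.1 = [x,y] ∧ ¬(x = a ∧ y = b) ∧ x ≠ b) →
    ∀ X, pvFold ps (a :: b :: X) = a :: b :: pvFold ps X := by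
  intro ps
  induction ps with
  | nil => intro _ X; rfl
  | cons p ps ih =>
    intro hps X
    obtain ⟨x, y, h1, h2, h3⟩ := hps p (by simp)
    have hskip : pvRep p.1 [p.2] (a :: b :: X) = a :: b :: pvRep p.1 [p.2] X := by
      rw [h1, rep_skip _ _ _ _ (by
          rw [isPrefixOf_pair]; rintro ⟨rfl, hy⟩; simp at hy; exact h2 ⟨rfl, hy.symm⟩),
        rep_skip _ _ _ _ (by
          rw [isPrefixOf_pair]; rintro ⟨rfl, -⟩; exact h3 rfl)]
    rw [fold_cons, hskip, ih (fun q hq => hps q (by simp [hq])) _, fold_cons]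

theorem fold_skip1 (v : Char) :
    ∀ ps, (∀ p ∈ ps, ∃ x y, p.1 = [x,y] ∧ x ≠ v) →
    ∀ X, pvFold ps (v :: X) = v :: pvFold ps X := by
  intro ps
  induction ps with
  | nil => intro _ X; rfl
  | cons p ps ih =>
    intro hps X
    obtain ⟨x, y, h1, h2⟩ := hps p (by simp)
    have hskip : pvRep p.1 [p.2] (v :: X) = v :: pvRep p.1 [p.2] X := by
      rw [h1]
      exact rep_skip _ _ _ _ (by rw [isPrefixOf_pair]; rintro ⟨rfl, -⟩; exact h2 rfl)
    rw [fold_cons, hskip, ih (fun q hq => hps q (by simp [hq])) _, fold_cons]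

theorem fold_single (a : Char) :
    ∀ ps, (∀ p ∈ ps, ∃ x y, p.1 = [x,y]) → pvFold ps [a] = [a] := by
  intro ps
  induction ps with
  | nil => intro _; rfl
  | cons p ps ih =>
    intro hps
    obtain ⟨x, y, h1⟩ := hps p (by simp)
    have hskip : pvRep p.1 [p.2] [a] = [a] := by
      rw [h1, rep_skip _ _ _ _ (by rw [isPrefixOf_pair]; rintro ⟨-, h⟩; simp at h), rep_nil]
    rw [fold_cons, hskip]
    exact ih (fun q hq => hps q (by simp [hq]))

theorem fold_skip_none (a b : Char) (hnone : pvTwo.get? [a,b] = none) :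
    ∀ ps, (∀ p ∈ ps, p ∈ pvPairs2) →
    ∀ t, (∀ hc, t.head? = some hc → hc = b ∨ hc ∈ pvVals) →
      pvFold ps (a :: t) = a :: pvFold ps t := by
  intro ps
  induction ps with
  | nil => intro _ t _; rfl
  | cons p ps ih =>
    intro hps t hhead
    have hp2 : p ∈ pvPairs2 := hps p (by simp)
    obtain ⟨x, y, h1⟩ := pairs2_shape p hp2
    have hskip : pvRep p.1 [p.2] (a :: t) = a :: pvRep p.1 [p.2] t := by
      rw [h1]
      refine rep_skip _ _ _ _ ?_
      rw [isPrefixOf_pair]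
      rintro ⟨rfl, hy⟩
      rcases hhead y hy with rfl | hyv
      · have := mem_pairs2_get? p hp2
        rw [h1] at this
        rw [this] at hnone
        simp at hnone
      · exact pairs2_snd_not_val p hp2 y hyv (by rw [h1]; simp)
    rw [fold_cons, hskip, ih (fun q hq => hps q (by simp [hq])) _ (by
        intro hc hhc
        rcases rep_head p.1 p.2 t hc hhc with rfl | hold
        · exact Or.inr (pairs2_val p hp2)
        · exact hhead hc hold), fold_cons]

theorem case_helper (a b v : Char) (l1 l2 : List (List Char × Char))
    (hsplit : pvPairs2 = l1 ++ ([a,b],v) :: l2)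
    (hl1 : ∀ p ∈ l1, ∃ x y, p.1 = [x,y] ∧ ¬(x = a ∧ y = b) ∧ x ≠ b)
    (hl2 : ∀ p ∈ l2, ∃ x y, p.1 = [x,y] ∧ x ≠ v)
    (t : List Char) :
    pvFold pvPairs2 (a :: b :: t) = v :: pvFold pvPairs2 t := by
  rw [hsplit, fold_append, fold_append, fold_skip2 a b l1 hl1 t,
    fold_cons, fold_cons,
    rep_match _ _ _ _ (by simp) (by simp [List.isPrefixOf])]
  rw [List.singleton_append]
  exact fold_skip1 v l2 hl2 _

theorem g2_cons_some (a b v : Char) (t : List Char) (h : pvTwo.get? [a,b] = some [v]) :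
    pvG2 (a :: b :: t) = v :: pvG2 t := by
  rw [pvG2]
  simp only [List.take_succ_cons, List.take_zero, h]
  simp

theorem g2_cons_none (a b : Char) (t : List Char) (h : pvTwo.get? [a,b] = none) :
    pvG2 (a :: b :: t) = a :: pvG2 (b :: t) := by
  rw [pvG2]
  simp only [List.take_succ_cons, List.take_zero, h]

theorem get?_none_of (a b : Char)
    (h1 : ¬(a = 'y' ∧ b = 'o'))
    (h2 : ¬(a = 'z' ∧ b = 'h'))
    (h3 : ¬(a = 'k' ∧ b = 'h'))
    (h4 : ¬(a = 't' ∧ b = 's'))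
    (h5 : ¬(a = 'c' ∧ b = 'h'))
    (h6 : ¬(a = 's' ∧ b = 'h'))
    (h7 : ¬(a = 'y' ∧ b = 'u'))
    (h8 : ¬(a = 'y' ∧ b = 'a'))
    : pvTwo.get? [a,b] = none := by
  simp only [pvTwo]
  rw [PySem.Dict.get?_mk_cons, if_neg (by
    simp only [beq_iff_eq, List.cons.injEq, and_true]
    rintro ⟨rfl, rfl⟩; exact h1 ⟨rfl, rfl⟩)]
  rw [PySem.Dict.get?_mk_cons, if_neg (by
    simp only [beq_iff_eq, List.cons.injEq, and_true]
    rintro ⟨rfl, rfl⟩; exact h2 ⟨rfl, rfl⟩)]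
  rw [PySem.Dict.get?_mk_cons, if_neg (by
    simp only [beq_iff_eq, List.cons.injEq, and_true]
    rintro ⟨rfl, rfl⟩; exact h3 ⟨rfl, rfl⟩)]
  rw [PySem.Dict.get?_mk_cons, if_neg (by
    simp only [beq_iff_eq, List.cons.injEq, and_true]
    rintro ⟨rfl, rfl⟩; exact h4 ⟨rfl, rfl⟩)]
  rw [PySem.Dict.get?_mk_cons, if_neg (by
    simp only [beq_iff_eq, List.cons.injEq, and_true]
    rintro ⟨rfl, rfl⟩; exact h5 ⟨rfl, rfl⟩)]
  rw [PySem.Dict.get?_mk_cons, if_neg (by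
    simp only [beq_iff_eq, List.cons.injEq, and_true]
    rintro ⟨rfl, rfl⟩; exact h6 ⟨rfl, rfl⟩)]
  rw [PySem.Dict.get?_mk_cons, if_neg (by
    simp only [beq_iff_eq, List.cons.injEq, and_true]
    rintro ⟨rfl, rfl⟩; exact h7 ⟨rfl, rfl⟩)]
  rw [PySem.Dict.get?_mk_cons, if_neg (by
    simp only [beq_iff_eq, List.cons.injEq, and_true]
    rintro ⟨rfl, rfl⟩; exact h8 ⟨rfl, rfl⟩)]
  rfl

theorem F2_eq_G2 : ∀ nn s, s.length ≤ nn → pvFold pvPairs2 s = pvG2 s := by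
  intro nn
  induction nn with
  | zero =>
    intro s hs
    have : s = [] := List.length_eq_zero_iff.mp (Nat.le_zero.mp hs)
    subst this
    rw [fold_nil, pvG2]
  | succ f ih =>
    intro s hs
    match s with
    | [] => rw [fold_nil, pvG2]
    | [a] =>
      rw [fold_single a pvPairs2 pairs2_shape, pvG2]
      have h : pvTwo.get? [a] = none := by
        simp only [pvTwo]
        rw [PySem.Dict.get?_mk_cons, if_neg (by simp), PySem.Dict.get?_mk_cons, if_neg (by simp),
          PySem.Dict.get?_mk_cons, if_neg (by simp), PySem.Dict.get?_mk_cons, if_neg (by simp),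
          PySem.Dict.get?_mk_cons, if_neg (by simp), PySem.Dict.get?_mk_cons, if_neg (by simp),
          PySem.Dict.get?_mk_cons, if_neg (by simp), PySem.Dict.get?_mk_cons, if_neg (by simp)]
        rfl
      simp only [List.take_succ_cons, List.take_nil, h]
      rw [show pvG2 [] = [] from by rw [pvG2]]
    | a :: b :: t =>
      by_cases h1 : a = 'y' ∧ b = 'o'
      · obtain ⟨rfl, rfl⟩ := h1
        rw [case_helper 'y' 'o' 'ё' [] [(['z','h'], 'ж'), (['k','h'], 'х'), (['t','s'], 'ц'), (['c','h'], 'ч'), (['s','h'], 'ш'), (['y','u'], 'ю'), (['y','a'], 'я')] rfl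
            (by simp)
            (by intro p hp; fin_cases hp <;> exact ⟨_, _, rfl, by decide⟩) t,
          ih t (by simp at hs; omega), g2_cons_some _ _ _ _ rfl]
      by_cases h2 : a = 'z' ∧ b = 'h'
      · obtain ⟨rfl, rfl⟩ := h2
        rw [case_helper 'z' 'h' 'ж' [(['y','o'], 'ё')] [(['k','h'], 'х'), (['t','s'], 'ц'), (['c','h'], 'ч'), (['s','h'], 'ш'), (['y','u'], 'ю'), (['y','a'], 'я')] rfl
            (by intro p hp; fin_cases hp <;> exact ⟨_, _, rfl, by decide, by decide⟩)
            (by intro p hp; fin_cases hp <;> exact ⟨_, _, rfl, by decide⟩) t,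
          ih t (by simp at hs; omega), g2_cons_some _ _ _ _ rfl]
      by_cases h3 : a = 'k' ∧ b = 'h'
      · obtain ⟨rfl, rfl⟩ := h3
        rw [case_helper 'k' 'h' 'х' [(['y','o'], 'ё'), (['z','h'], 'ж')] [(['t','s'], 'ц'), (['c','h'], 'ч'), (['s','h'], 'ш'), (['y','u'], 'ю'), (['y','a'], 'я')] rfl
            (by intro p hp; fin_cases hp <;> exact ⟨_, _, rfl, by decide, by decide⟩)
            (by intro p hp; fin_cases hp <;> exact ⟨_, _, rfl, by decide⟩) t,
          ih t (by simp at hs; omega), g2_cons_some _ _ _ _ rfl]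
      by_cases h4 : a = 't' ∧ b = 's'
      · obtain ⟨rfl, rfl⟩ := h4
        rw [case_helper 't' 's' 'ц' [(['y','o'], 'ё'), (['z','h'], 'ж'), (['k','h'], 'х')] [(['c','h'], 'ч'), (['s','h'], 'ш'), (['y','u'], 'ю'), (['y','a'], 'я')] rfl
            (by intro p hp; fin_cases hp <;> exact ⟨_, _, rfl, by decide, by decide⟩)
            (by intro p hp; fin_cases hp <;> exact ⟨_, _, rfl, by decide⟩) t,
          ih t (by simp at hs; omega), g2_cons_some _ _ _ _ rfl]
      by_cases h5 : a = 'c' ∧ b = 'h'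
      · obtain ⟨rfl, rfl⟩ := h5
        rw [case_helper 'c' 'h' 'ч' [(['y','o'], 'ё'), (['z','h'], 'ж'), (['k','h'], 'х'), (['t','s'], 'ц')] [(['s','h'], 'ш'), (['y','u'], 'ю'), (['y','a'], 'я')] rfl
            (by intro p hp; fin_cases hp <;> exact ⟨_, _, rfl, by decide, by decide⟩)
            (by intro p hp; fin_cases hp <;> exact ⟨_, _, rfl, by decide⟩) t,
          ih t (by simp at hs; omega), g2_cons_some _ _ _ _ rfl]
      by_cases h6 : a = 's' ∧ b = 'h'
      · obtain ⟨rfl, rfl⟩ := h6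
        rw [case_helper 's' 'h' 'ш' [(['y','o'], 'ё'), (['z','h'], 'ж'), (['k','h'], 'х'), (['t','s'], 'ц'), (['c','h'], 'ч')] [(['y','u'], 'ю'), (['y','a'], 'я')] rfl
            (by intro p hp; fin_cases hp <;> exact ⟨_, _, rfl, by decide, by decide⟩)
            (by intro p hp; fin_cases hp <;> exact ⟨_, _, rfl, by decide⟩) t,
          ih t (by simp at hs; omega), g2_cons_some _ _ _ _ rfl]
      by_cases h7 : a = 'y' ∧ b = 'u'
      · obtain ⟨rfl, rfl⟩ := h7
        rw [case_helper 'y' 'u' 'ю' [(['y','o'], 'ё'), (['z','h'], 'ж'), (['k','h'], 'х'), (['t','s'], 'ц'), (['c','h'], 'ч'), (['s','h'], 'ш')] [(['y','a'], 'я')] rfl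
            (by intro p hp; fin_cases hp <;> exact ⟨_, _, rfl, by decide, by decide⟩)
            (by intro p hp; fin_cases hp <;> exact ⟨_, _, rfl, by decide⟩) t,
          ih t (by simp at hs; omega), g2_cons_some _ _ _ _ rfl]
      by_cases h8 : a = 'y' ∧ b = 'a'
      · obtain ⟨rfl, rfl⟩ := h8
        rw [case_helper 'y' 'a' 'я' [(['y','o'], 'ё'), (['z','h'], 'ж'), (['k','h'], 'х'), (['t','s'], 'ц'), (['c','h'], 'ч'), (['s','h'], 'ш'), (['y','u'], 'ю')] [] rfl
            (by intro p hp; fin_cases hp <;> exact ⟨_, _, rfl, by decide, by decide⟩)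
            (by simp) t,
          ih t (by simp at hs; omega), g2_cons_some _ _ _ _ rfl]
      have hnone := get?_none_of a b h1 h2 h3 h4 h5 h6 h7 h8
      rw [fold_skip_none a b hnone pvPairs2 (fun p hp => hp) (b :: t) (by
          intro hc hh; simp only [List.head?_cons, Option.some.injEq] at hh; exact Or.inl hh.symm),
        ih (b :: t) (by simp at hs ⊢; omega), g2_cons_none a b t hnone]


-- ==== single-letter passes = map ====

theorem rep_single_map (c v : Char) (s : List Char) :
    pvRep [c] [v] s = s.map (fun x => if c = x then v else x) := by
  induction s with
  | nil => rw [rep_nil]; rfl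
  | cons c' t ih =>
    by_cases h : c = c'
    · subst h
      rw [pvRep, if_pos ⟨by simp, by simp [List.isPrefixOf]⟩]
      simp [ih]
    · rw [rep_skip _ _ _ _ (by simp [List.isPrefixOf, h])]
      simp [h, ih]

theorem foldSingles_map :
    ∀ (qs : List (Char × Char)) (s : List Char),
      pvFold (qs.map (fun p => ([p.1], p.2))) s
        = s.map (fun c => qs.foldl (fun x p => if p.1 = x then p.2 else x) c) := by
  intro qs
  induction qs with
  | nil => intro s; simp [pvFold]
  | cons q qs ih =>
    intro s
    rw [List.map_cons, fold_cons]
    rw [show (([q.1], q.2) : List Char × Char).1 = [q.1] from rfl,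
      show (([q.1], q.2) : List Char × Char).2 = q.2 from rfl,
      rep_single_map q.1 q.2 s, ih, List.map_map]
    rfl

theorem sigma_getD : ∀ c, pvOne.getD [c] [c] = [pvSigma c] := by
  intro c
  by_cases h1 : 'a' = c
  · rw [← h1]; decide
  by_cases h2 : 'b' = c
  · rw [← h2]; decide
  by_cases h3 : 'v' = c
  · rw [← h3]; decide
  by_cases h4 : 'g' = c
  · rw [← h4]; decide
  by_cases h5 : 'd' = c
  · rw [← h5]; decide
  by_cases h6 : 'e' = c
  · rw [← h6]; decide
  by_cases h7 : 'z' = c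
  · rw [← h7]; decide
  by_cases h8 : 'i' = c
  · rw [← h8]; decide
  by_cases h9 : 'y' = c
  · rw [← h9]; decide
  by_cases h10 : 'k' = c
  · rw [← h10]; decide
  by_cases h11 : 'l' = c
  · rw [← h11]; decide
  by_cases h12 : 'm' = c
  · rw [← h12]; decide
  by_cases h13 : 'n' = c
  · rw [← h13]; decide
  by_cases h14 : 'o' = c
  · rw [← h14]; decide
  by_cases h15 : 'p' = c
  · rw [← h15]; decide
  by_cases h16 : 'r' = c
  · rw [← h16]; decide
  by_cases h17 : 's' = c
  · rw [← h17]; decide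
  by_cases h18 : 't' = c
  · rw [← h18]; decide
  by_cases h19 : 'u' = c
  · rw [← h19]; decide
  by_cases h20 : 'f' = c
  · rw [← h20]; decide
  rw [show pvSigma c = c from by
    simp only [pvSigma, pvSingles, List.foldl_cons, List.foldl_nil, if_neg h1, if_neg h2, if_neg h3, if_neg h4, if_neg h5, if_neg h6, if_neg h7, if_neg h8, if_neg h9, if_neg h10, if_neg h11, if_neg h12, if_neg h13, if_neg h14, if_neg h15, if_neg h16, if_neg h17, if_neg h18, if_neg h19, if_neg h20]]
  have hn : pvOne.get? [c] = none := by
    simp only [pvOne]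
    rw [PySem.Dict.get?_mk_cons, if_neg (by simp only [beq_iff_eq, List.cons.injEq, and_true]; exact h1),
    PySem.Dict.get?_mk_cons, if_neg (by simp only [beq_iff_eq, List.cons.injEq, and_true]; exact h2),
    PySem.Dict.get?_mk_cons, if_neg (by simp only [beq_iff_eq, List.cons.injEq, and_true]; exact h3),
    PySem.Dict.get?_mk_cons, if_neg (by simp only [beq_iff_eq, List.cons.injEq, and_true]; exact h4),
    PySem.Dict.get?_mk_cons, if_neg (by simp only [beq_iff_eq, List.cons.injEq, and_true]; exact h5),
    PySem.Dict.get?_mk_cons, if_neg (by simp only [beq_iff_eq, List.cons.injEq, and_true]; exact h6),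
    PySem.Dict.get?_mk_cons, if_neg (by simp only [beq_iff_eq, List.cons.injEq, and_true]; exact h7),
    PySem.Dict.get?_mk_cons, if_neg (by simp only [beq_iff_eq, List.cons.injEq, and_true]; exact h8),
    PySem.Dict.get?_mk_cons, if_neg (by simp only [beq_iff_eq, List.cons.injEq, and_true]; exact h9),
    PySem.Dict.get?_mk_cons, if_neg (by simp only [beq_iff_eq, List.cons.injEq, and_true]; exact h10),
    PySem.Dict.get?_mk_cons, if_neg (by simp only [beq_iff_eq, List.cons.injEq, and_true]; exact h11),
    PySem.Dict.get?_mk_cons, if_neg (by simp only [beq_iff_eq, List.cons.injEq, and_true]; exact h12),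
    PySem.Dict.get?_mk_cons, if_neg (by simp only [beq_iff_eq, List.cons.injEq, and_true]; exact h13),
    PySem.Dict.get?_mk_cons, if_neg (by simp only [beq_iff_eq, List.cons.injEq, and_true]; exact h14),
    PySem.Dict.get?_mk_cons, if_neg (by simp only [beq_iff_eq, List.cons.injEq, and_true]; exact h15),
    PySem.Dict.get?_mk_cons, if_neg (by simp only [beq_iff_eq, List.cons.injEq, and_true]; exact h16),
    PySem.Dict.get?_mk_cons, if_neg (by simp only [beq_iff_eq, List.cons.injEq, and_true]; exact h17),
    PySem.Dict.get?_mk_cons, if_neg (by simp only [beq_iff_eq, List.cons.injEq, and_true]; exact h18),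
    PySem.Dict.get?_mk_cons, if_neg (by simp only [beq_iff_eq, List.cons.injEq, and_true]; exact h19),
    PySem.Dict.get?_mk_cons, if_neg (by simp only [beq_iff_eq, List.cons.injEq, and_true]; exact h20)]
    rfl
  rw [PySem.Dict.getD_eq_get?_getD, hn]
  rfl

theorem get?_two_val (q v : List Char) (h : pvTwo.get? q = some v) : v.map pvSigma = v := by
  simp only [pvTwo, PySem.Dict.get?_mk_cons] at h
  split_ifs at h
  all_goals first
    | (simp only [Option.some.injEq] at h; subst h; decide)
    | (exact absurd h (by simp [show ∀ q : List Char, (PySem.Dict.mk ([] : List (List Char × List Char))).get? q = none from fun _ => rfl]))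

theorem G2_piece : ∀ nn p, p.length ≤ nn → (pvG2 p).map pvSigma = pvPiece p := by
  intro nn
  induction nn with
  | zero =>
    intro p hp
    have : p = [] := List.length_eq_zero_iff.mp (Nat.le_zero.mp hp)
    subst this
    rw [pvG2, pvPiece]; rfl
  | succ f ih =>
    intro p hp
    match p with
    | [] => rw [pvG2, pvPiece]; rfl
    | a :: t =>
      rw [pvG2, pvPiece]
      cases hq : pvTwo.get? ((a :: t).take 2) with
      | some v =>
        simp only [hq]
        rw [List.map_append, get?_two_val _ _ hq, ih (t.drop 1) (by simp at hp ⊢; omega)]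
      | none =>
        simp only [hq]
        rw [List.map_cons, ih t (by simp at hp ⊢; omega), sigma_getD a]
        rfl

-- ==== assembly ====

theorem A_eq (text : String) : transliterate_en_ru text = PySem.Str.replace (PySem.Str.replace (PySem.Str.replace (PySem.Str.replace (PySem.Str.replace (PySem.Str.replace (PySem.Str.replace (PySem.Str.replace (PySem.Str.replace (PySem.Str.replace (PySem.Str.replace (PySem.Str.replace (PySem.Str.replace (PySem.Str.replace (PySem.Str.replace (PySem.Str.replace (PySem.Str.replace (PySem.Str.replace (PySem.Str.replace (PySem.Str.replace (PySem.Str.replace (PySem.Str.replace (PySem.Str.replace (PySem.Str.replace (PySem.Str.replace (PySem.Str.replace (PySem.Str.replace (PySem.Str.replace (PySem.Str.replace (text) "shch" "щ") "yo" "ё") "zh" "ж") "kh" "х") "ts" "ц") "ch" "ч") "sh" "ш") "yu" "ю") "ya" "я") "a" "а") "b" "б") "v" "в") "g" "г") "d" "д") "e" "э") "z" "з") "i" "и") "y" "ы") "k" "к") "l" "л") "m" "м") "n" "н") "o" "о") "p" "п") "r" "р") "s" "с") "t" "т") "u" "у") "f" "ф" := rfl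

theorem A_toList (text : String) :
    (transliterate_en_ru text).toList = pvFold pvAll (pvRep pvSH ['щ'] text.toList) := by
  rw [A_eq]
  simp only [PySem.Str.toList_replace,
    (show ("a".toList) = ['a'] from rfl),
    (show ("b".toList) = ['b'] from rfl),
    (show ("ch".toList) = ['c','h'] from rfl),
    (show ("d".toList) = ['d'] from rfl),
    (show ("e".toList) = ['e'] from rfl),
    (show ("f".toList) = ['f'] from rfl),
    (show ("g".toList) = ['g'] from rfl),
    (show ("i".toList) = ['i'] from rfl),
    (show ("k".toList) = ['k'] from rfl),
    (show ("kh".toList) = ['k','h'] from rfl),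
    (show ("l".toList) = ['l'] from rfl),
    (show ("m".toList) = ['m'] from rfl),
    (show ("n".toList) = ['n'] from rfl),
    (show ("o".toList) = ['o'] from rfl),
    (show ("p".toList) = ['p'] from rfl),
    (show ("r".toList) = ['r'] from rfl),
    (show ("s".toList) = ['s'] from rfl),
    (show ("sh".toList) = ['s','h'] from rfl),
    (show ("shch".toList) = ['s','h','c','h'] from rfl),
    (show ("t".toList) = ['t'] from rfl),
    (show ("ts".toList) = ['t','s'] from rfl),
    (show ("u".toList) = ['u'] from rfl),
    (show ("v".toList) = ['v'] from rfl),
    (show ("y".toList) = ['y'] from rfl),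
    (show ("ya".toList) = ['y','a'] from rfl),
    (show ("yo".toList) = ['y','o'] from rfl),
    (show ("yu".toList) = ['y','u'] from rfl),
    (show ("z".toList) = ['z'] from rfl),
    (show ("zh".toList) = ['z','h'] from rfl),
    (show ("а".toList) = ['а'] from rfl),
    (show ("б".toList) = ['б'] from rfl),
    (show ("в".toList) = ['в'] from rfl),
    (show ("г".toList) = ['г'] from rfl),
    (show ("д".toList) = ['д'] from rfl),
    (show ("ж".toList) = ['ж'] from rfl),
    (show ("з".toList) = ['з'] from rfl),
    (show ("и".toList) = ['и'] from rfl),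
    (show ("к".toList) = ['к'] from rfl),
    (show ("л".toList) = ['л'] from rfl),
    (show ("м".toList) = ['м'] from rfl),
    (show ("н".toList) = ['н'] from rfl),
    (show ("о".toList) = ['о'] from rfl),
    (show ("п".toList) = ['п'] from rfl),
    (show ("р".toList) = ['р'] from rfl),
    (show ("с".toList) = ['с'] from rfl),
    (show ("т".toList) = ['т'] from rfl),
    (show ("у".toList) = ['у'] from rfl),
    (show ("ф".toList) = ['ф'] from rfl),
    (show ("х".toList) = ['х'] from rfl),
    (show ("ц".toList) = ['ц'] from rfl),
    (show ("ч".toList) = ['ч'] from rfl),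
    (show ("ш".toList) = ['ш'] from rfl),
    (show ("щ".toList) = ['щ'] from rfl),
    (show ("ы".toList) = ['ы'] from rfl),
    (show ("э".toList) = ['э'] from rfl),
    (show ("ю".toList) = ['ю'] from rfl),
    (show ("я".toList) = ['я'] from rfl),
    (show ("ё".toList) = ['ё'] from rfl)]
  repeat rw [replace_eq _ _ _ (by simp)]
  rfl

theorem B_toList (text : String) :
    (transliterate_en_ru_alt text).toList
      = PySem.Chars.join ['щ'] ((pvSpl pvSH text.toList).map pvPiece) := by
  simp only [transliterate_en_ru_alt, String.toList_ofList]
  rw [splitOn_eq text.toList ['s','h','c','h'] (by simp)]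
  rfl

theorem toList_eq (text : String) :
    (transliterate_en_ru text).toList = (transliterate_en_ru_alt text).toList := by
  have hAllsep : ∀ p ∈ pvAll, 'щ' ∉ p.1 := by decide
  rw [A_toList, B_toList, rep_eq_join pvSH ['щ'] (by simp [pvSH]) text.toList,
    fold_join pvAll hAllsep (pvSpl pvSH text.toList) (pvSpl_ne_nil _ _)]
  congr 1
  apply List.map_congr_left
  intro p _
  rw [show pvAll = pvPairs2 ++ pvSingles.map (fun p => ([p.1], p.2)) from rfl, fold_append,
    F2_eq_G2 p.length p le_rfl, foldSingles_map pvSingles (pvG2 p)]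
  show (pvG2 p).map pvSigma = pvPiece p
  exact G2_piece p.length p le_rfl

-- ===== VERDICT (by name: the statement is the Claim_ definition above) =====
theorem transliterate_en_ru_spec : Claim_equal_transliterate_en_ru := by
  intro text _
  unfold Spec_transliterate_en_ru
  have h := toList_eq text
  calc transliterate_en_ru text = String.ofList (transliterate_en_ru text).toList := String.ofList_toList.symm
    _ = String.ofList (transliterate_en_ru_alt text).toList := by rw [h]
    _ = transliterate_en_ru_alt text := String.ofList_toList
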